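-- pv_equiv track=rewrite | github.com/woojerry/Algorithms | Others/11st/2.py | solution
-- ===== SOURCE A (Python) =====
-- def solution(S):
--     # write your code in Python 3.6
--     pass
--
--     blocks = []
--
--     tmp = ''
--     num = 0
--     for i in range(len(S)):
--         if i == 0:
--             tmp = S[i]
--             num = 1
--
--         elif tmp == S[i]:
--             num += 1
--
--             if i == len(S) - 1:
--                 blocks.append(num)
--
--         elif tmp != S[i]:
--             blocks.append(num)
--             num = 1
--             tmp = S[i]
--
--             if i == len(S) - 1:
--                 blocks.append(num)
--
--     max_block = max(blocks)
--
--     answer = 0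
--     for j in blocks:
--         if j < max_block:
--             answer += max_block - j
--
--     return answer
-- ===== SOURCE B (Python) =====
-- def solution(S):
--     # Boundary-position formulation: collect the indices where the character
--     # changes, take consecutive differences of the cut positions as the block
--     # lengths, and use the closed form max * count - len(S).
--     n = len(S)
--     cuts = [0] + [i for i in range(1, n) if S[i] != S[i - 1]] + [n]
--     diffs = [b - a for a, b in zip(cuts, cuts[1:])]
--     return max(diffs) * len(diffs) - n
-- ===== Notes on version B (the rewrite author's own statement) =====
-- stated objective: alternative
-- what changed: B never maintains a running counter or run-length accumulator: it collects the boundary indices where the character changes, derives the block lengths as consecutive differences of those cut positions, and replaces A's second summation loop by the closed form max(diffs)*len(diffs) - len(S).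
-- crash fix: On strings of length 0 or 1, A raises ValueError (max of the empty blocks list, which A's loop never fills) while B returns 0. — e.g. on solution("a"): A raises ValueError, B returns 0
import Mathlib
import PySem

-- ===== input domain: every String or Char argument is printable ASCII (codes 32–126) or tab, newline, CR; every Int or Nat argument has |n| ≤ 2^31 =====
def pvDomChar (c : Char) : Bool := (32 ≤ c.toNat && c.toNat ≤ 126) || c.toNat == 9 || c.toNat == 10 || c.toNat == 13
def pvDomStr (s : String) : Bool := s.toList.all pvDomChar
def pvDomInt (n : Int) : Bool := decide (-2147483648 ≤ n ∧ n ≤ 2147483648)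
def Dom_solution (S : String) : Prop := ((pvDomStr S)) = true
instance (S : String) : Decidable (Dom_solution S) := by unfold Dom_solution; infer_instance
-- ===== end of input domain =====

-- B replaces A's run-counting loop by boundary indices (positions where the character
-- changes), block lengths as consecutive differences of cuts, and the closed form
-- max*count - len(S) instead of A's second summation loop (objective: alternative).


-- ===== PORT A =====
-- one iteration of A's first loop (body of 'for i in range(len(S))')
def stepA (cs : List Char) (st : List Int × List Char × Int) (i : Int) : List Int × List Char × Int :=
  let blocks := st.1
  let tmp := st.2.1
  let num := st.2.2
  let si := [PySem.List.pyGetD cs i ' ']  -- S[i]; i ∈ [0, len) in every call, so the default is never used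
  if i = 0 then (blocks, si, 1)
  else if tmp = si then
    let num := num + 1
    ((if i = (cs.length : Int) - 1 then blocks ++ [num] else blocks), tmp, num)
  else
    let blocks := blocks ++ [num]
    ((if i = (cs.length : Int) - 1 then blocks ++ [1] else blocks), si, 1)

def solution (S : String) : Int :=
  let cs := S.toList
  let st := (PySem.List.pyRange 0 (PySem.Str.len S) 1).foldl (stepA cs) ([], [], 0)
  match PySem.List.max? st.1 id with
  | none => 0   -- Python: max([]) raises ValueError here; excluded by Pre_solution
  | some m => st.1.foldl (fun answer j => if j < m then answer + (m - j) else answer) 0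

-- ===== PORT B =====
def solution_alt (S : String) : Int :=
  let cs := S.toList
  let n : Int := PySem.Str.len S
  -- cuts = [0] + [i for i in range(1, n) if S[i] != S[i-1]] + [n]
  let cuts : List Int := [0] ++ ((PySem.List.pyRange 1 n 1).filter
      (fun i => PySem.List.pyGetD cs i ' ' != PySem.List.pyGetD cs (i - 1) ' ')) ++ [n]
  -- diffs = [b - a for a, b in zip(cuts, cuts[1:])]   (cuts[1:] = drop 1, exact)
  let diffs : List Int := (cuts.zip (cuts.drop 1)).map (fun ab => ab.2 - ab.1)
  match PySem.List.max? diffs id with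
  | none => 0   -- unreachable: cuts always has ≥ 2 elements, so diffs ≠ []
  | some m => m * diffs.length - n

-- ===== PRECONDITION & SPEC =====
-- Pre_ excludes exactly the inputs where A raises: on len(S) ≤ 1 A's blocks list stays
-- empty and max([]) raises ValueError.
def Pre_solution (S : String) : Prop := 2 ≤ S.toList.length
instance (S : String) : Decidable (Pre_solution S) := by unfold Pre_solution; infer_instance
def pvWitness_solution : String := "aab"

-- On strings of length 0 or 1, A raises ValueError (max of the empty blocks list) while B returns 0.
def Raises_solution (S : String) : Prop := S.toList.length ≤ 1
instance (S : String) : Decidable (Raises_solution S) := by unfold Raises_solution; infer_instance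
def pvRaiseWitness_solution : String := "a"
def pvRaiseWitnessOut_solution : Int := 0

def Spec_solution (S : String) (out : Int) : Prop := out = solution_alt S
instance (S : String) (out : Int) : Decidable (Spec_solution S out) := by unfold Spec_solution; infer_instance

-- ===== CLAIM (what is proved, stated in full; the proofs are below) =====
def Claim_equal_solution : Prop := ∀ (S : String), Dom_solution S → Pre_solution S → Spec_solution S (solution S)
def Claim_raises_solution : Prop := (∀ (S : String), Dom_solution S → Raises_solution S → ¬ Pre_solution S) ∧ (Dom_solution (pvRaiseWitness_solution) ∧ Raises_solution (pvRaiseWitness_solution) ∧ solution_alt (pvRaiseWitness_solution) = pvRaiseWitnessOut_solution)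

-- ===== LEMMAS AND PROOFS =====

-- proof-only reference: run lengths of a list, with pending run (p, m)
def rleGo (p : Char) (m : Int) : List Char → List Int
  | [] => [m]
  | c :: t => if c = p then rleGo p (m + 1) t else m :: rleGo c 1 t

theorem rleGo_ne_nil (p : Char) (m : Int) (t : List Char) : rleGo p m t ≠ [] := by
  induction t generalizing p m with
  | nil => simp [rleGo]
  | cons c t ih =>
      by_cases h : c = p
      · simpa [rleGo, h] using ih p (m + 1)
      · simp [rleGo, h]

theorem rleGo_sum (p : Char) (m : Int) (t : List Char) :
    (rleGo p m t).sum = m + t.length := by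
  induction t generalizing p m with
  | nil => simp [rleGo]
  | cons c t ih =>
      by_cases h : c = p <;> simp only [rleGo, h, if_pos, if_false,
        List.sum_cons, List.length_cons, ih] <;> push_cast <;> ring

-- equations for A's step function
theorem stepA_zero (full : List Char) (L : List Int) (tmp : List Char) (num : Int) :
    stepA full (L, tmp, num) 0 = (L, [PySem.List.pyGetD full 0 ' '], 1) := by
  simp [stepA]

theorem stepA_mid (full : List Char) (L : List Int) (tmp : List Char) (num : Int) (i : Int)
    (h0 : i ≠ 0) (hl : i ≠ (full.length : Int) - 1) :
    stepA full (L, tmp, num) i =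
      if tmp = [PySem.List.pyGetD full i ' '] then (L, tmp, num + 1)
      else (L ++ [num], [PySem.List.pyGetD full i ' '], 1) := by
  simp only [stepA]
  rw [if_neg h0]
  by_cases h : tmp = [PySem.List.pyGetD full i ' ']
  · rw [if_pos h, if_neg hl, if_pos h]
  · rw [if_neg h, if_neg hl, if_neg h]

theorem stepA_last (full : List Char) (L : List Int) (tmp : List Char) (num : Int) (i : Int)
    (h0 : i ≠ 0) (hl : i = (full.length : Int) - 1) :
    stepA full (L, tmp, num) i =
      if tmp = [PySem.List.pyGetD full i ' '] then (L ++ [num + 1], tmp, num + 1)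
      else (L ++ [num] ++ [1], [PySem.List.pyGetD full i ' '], 1) := by
  simp only [stepA]
  rw [if_neg h0]
  by_cases h : tmp = [PySem.List.pyGetD full i ' ']
  · rw [if_pos h, if_pos hl, if_pos h]
  · rw [if_neg h, if_pos hl, if_neg h]

-- simulation: from index k ≥ 1 on, A's remaining loop appends exactly rleGo p n rest
theorem simA (rest : List Char) (full : List Char) (k : Nat) (L : List Int) (p : Char) (n : Int)
    (hdrop : full.drop k = rest) (hk : 1 ≤ k) (hne : rest ≠ []) :
    ((PySem.List.pyRange (k : Int) (full.length : Int) 1).foldl (stepA full) (L, [p], n)).1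
      = L ++ rleGo p n rest := by
  induction rest generalizing k L p n with
  | nil => exact absurd rfl hne
  | cons c t ih =>
      have hklen : k < full.length := by
        by_contra h
        simp [List.drop_eq_nil_of_le (Nat.le_of_not_lt h)] at hdrop
      rw [List.drop_eq_getElem_cons hklen] at hdrop
      have hc : full[k] = c := (List.cons.injEq .. ▸ hdrop).1
      have hdrop1 : full.drop (k + 1) = t := (List.cons.injEq .. ▸ hdrop).2
      have hget : PySem.List.pyGetD full (k : Int) ' ' = c := by
        rw [PySem.List.pyGetD_eq_getElem full ' ' (by positivity) (by exact_mod_cast hklen)]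
        simpa using hc
      have hflen : full.length = k + 1 + t.length := by
        have := congrArg List.length hdrop1
        simp at this
        omega
      rw [PySem.List.pyRange_one_cons (by exact_mod_cast hklen)]
      simp only [List.foldl_cons]
      have hk0 : (k : Int) ≠ 0 := by
        have : (1:Int) ≤ (k:Int) := by exact_mod_cast hk
        omega
      cases t with
      | nil =>
          simp only [List.length_nil] at hflen
          have hlast : (k : Int) = (full.length : Int) - 1 := by
            rw [hflen]; push_cast; ring
          have hrange : PySem.List.pyRange ((k : Int) + 1) (full.length : Int) = [] := by
            apply PySem.List.pyRange_one_eq_nil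
            omega
          rw [hrange, stepA_last full L [p] n (k : Int) hk0 hlast, hget]
          by_cases h : c = p
          · rw [if_pos (show [p] = [c] by rw [h])]
            simp [rleGo, h]
          · rw [if_neg (show ¬ [p] = [c] by simp [Ne.symm h])]
            simp [rleGo, h]
      | cons c2 t2 =>
          have hnotlast : (k : Int) ≠ (full.length : Int) - 1 := by
            simp only [List.length_cons] at hflen
            rw [hflen]; push_cast; omega
          have hcast : ((k : Int) + 1) = (((k + 1 : Nat)) : Int) := by push_cast; ring
          rw [stepA_mid full L [p] n (k : Int) hk0 hnotlast, hget, hcast]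
          by_cases h : c = p
          · rw [if_pos (show [p] = [c] by rw [h])]
            rw [ih (k + 1) L p (n + 1) hdrop1 (by omega) (by simp)]
            simp [rleGo, h]
          · rw [if_neg (show ¬ [p] = [c] by simp [Ne.symm h])]
            rw [ih (k + 1) (L ++ [n]) c 1 hdrop1 (by omega) (by simp)]
            simp [rleGo, h]

-- A's whole first loop produces the run-length list (strings of length ≥ 2)
theorem loopA_eq_rle (c : Char) (t : List Char) (ht : t ≠ []) :
    ((PySem.List.pyRange 0 ((c :: t).length : Int) 1).foldl (stepA (c :: t)) ([], [], 0)).1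
      = rleGo c 1 t := by
  have hlen : (0 : Int) < ((c :: t).length : Int) := by simp
  rw [PySem.List.pyRange_one_cons hlen]
  simp only [List.foldl_cons]
  have h0 : stepA (c :: t) ([], [], 0) 0 = ([], [c], 1) := by
    rw [stepA_zero]
    simp [PySem.List.pyGetD]
  rw [h0, show (0:Int) + 1 = ((1:Nat):Int) by norm_num]
  simpa using simA t (c :: t) 1 [] c 1 (by simp) le_rfl ht

-- consecutive differences of a list (matches B's zip/map expression)
def pvDiffs (xs : List Int) : List Int := (xs.zip (xs.drop 1)).map (fun ab => ab.2 - ab.1)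

theorem pvDiffs_pair (a b : Int) (r : List Int) :
    pvDiffs (a :: b :: r) = (b - a) :: pvDiffs (b :: r) := by
  simp [pvDiffs]

-- key lemma: diffs of (a :: boundaries-from-k ++ [n]) are the run lengths of drop k,
-- with the pending run counted from position a
theorem cuts_diffs (t : List Char) (full : List Char) (k : Nat) (a : Int)
    (hdrop : full.drop k = t) (hk : 1 ≤ k) (hkn : k ≤ full.length) :
    pvDiffs ((a : Int) :: (((PySem.List.pyRange (k : Int) (full.length : Int) 1).filter
        (fun i => PySem.List.pyGetD full i ' ' != PySem.List.pyGetD full (i - 1) ' '))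
      ++ [(full.length : Int)]))
      = rleGo (PySem.List.pyGetD full ((k : Int) - 1) ' ') ((k : Int) - a) t := by
  induction t generalizing k a with
  | nil =>
      have hkeq : k = full.length := by
        have : full.length ≤ k := List.drop_eq_nil_iff.mp hdrop
        omega
      rw [PySem.List.pyRange_one_eq_nil (by omega)]
      simp [pvDiffs, rleGo, hkeq]
  | cons c t2 ih =>
      have hklen : k < full.length := by
        by_contra h
        simp [List.drop_eq_nil_of_le (Nat.le_of_not_lt h)] at hdrop
      rw [List.drop_eq_getElem_cons hklen] at hdrop
      have hc : full[k] = c := (List.cons.injEq .. ▸ hdrop).1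
      have hdrop1 : full.drop (k + 1) = t2 := (List.cons.injEq .. ▸ hdrop).2
      have hgetk : PySem.List.pyGetD full (k : Int) ' ' = c := by
        rw [PySem.List.pyGetD_eq_getElem full ' ' (by positivity) (by exact_mod_cast hklen)]
        simpa using hc
      rw [PySem.List.pyRange_one_cons (by exact_mod_cast hklen)]
      have hcast : ((k : Int) + 1) = (((k + 1 : Nat)) : Int) := by push_cast; ring
      have hcast1 : (((k + 1 : Nat) : Int)) - 1 = (k : Int) := by push_cast; ring
      simp only [List.filter_cons]
      by_cases h : PySem.List.pyGetD full (k : Int) ' ' = PySem.List.pyGetD full ((k : Int) - 1) ' '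
      · -- no boundary at k: the same run continues
        rw [if_neg (by simp [h])]
        rw [hcast, ih (k + 1) a hdrop1 (by omega) hklen]
        have hprev : PySem.List.pyGetD full ((k : Int) - 1) ' ' = c := by rw [← h, hgetk]
        rw [hcast1, hgetk, hprev]
        rw [show rleGo c ((k : Int) - a) (c :: t2) = rleGo c (((k : Int) - a) + 1) t2 from by
          simp [rleGo]]
        congr 1
        push_cast
        ring
      · -- boundary at k: a run of length k - a ends here
        rw [if_pos (by simpa using h)]
        simp only [List.cons_append]
        rw [pvDiffs_pair, hcast, ih (k + 1) (k : Int) hdrop1 (by omega) hklen]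
        have hne : c ≠ PySem.List.pyGetD full ((k : Int) - 1) ' ' := by rw [← hgetk]; exact h
        rw [hcast1, hgetk]
        rw [show rleGo (PySem.List.pyGetD full ((k : Int) - 1) ' ') ((k : Int) - a) (c :: t2)
            = ((k : Int) - a) :: rleGo c 1 t2 from by simp [rleGo, hne]]
        congr 2
        push_cast
        ring

-- B's diffs list (in exactly the port's shape) is the run-length list (nonempty strings)
theorem diffs_eq_rle (c : Char) (t : List Char) :
    ((([0] ++ ((PySem.List.pyRange 1 (((c :: t).length : Int)) 1).filter
        (fun i => PySem.List.pyGetD (c :: t) i ' ' != PySem.List.pyGetD (c :: t) (i - 1) ' '))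
      ++ [((c :: t).length : Int)]).zip
      (([0] ++ ((PySem.List.pyRange 1 (((c :: t).length : Int)) 1).filter
        (fun i => PySem.List.pyGetD (c :: t) i ' ' != PySem.List.pyGetD (c :: t) (i - 1) ' '))
      ++ [((c :: t).length : Int)]).drop 1)).map (fun ab => (ab : Int × Int).2 - ab.1))
      = rleGo c 1 t := by
  show pvDiffs ([0] ++ _ ++ [((c :: t).length : Int)]) = rleGo c 1 t
  rw [List.append_assoc, List.singleton_append]
  have := cuts_diffs t (c :: t) 1 0 (by simp) le_rfl (by simp)
  simp only [Nat.cast_one] at this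
  rw [this]
  norm_num [PySem.List.pyGetD]

-- A's second loop in closed form: every element is ≤ m, so the answer is m*count − sum
theorem loopA2_closed (bs : List Int) (m : Int) (hub : ∀ j ∈ bs, j ≤ m) (a : Int) :
    bs.foldl (fun answer j => if j < m then answer + (m - j) else answer) a
      = a + m * bs.length - bs.sum := by
  induction bs generalizing a with
  | nil => simp
  | cons b t ih =>
      have hb : b ≤ m := hub b (by simp)
      have hstep : (if b < m then a + (m - b) else a) = a + (m - b) := by
        by_cases h : b < m
        · simp [h]
        · have : b = m := le_antisymm hb (not_lt.mp h)
          simp [this]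
      simp only [List.foldl_cons, hstep]
      rw [ih (fun j hj => hub j (by simp [hj]))]
      simp only [List.length_cons, List.sum_cons]
      push_cast
      ring

theorem max?_id_ne_none (x : Int) (xs : List Int) : PySem.List.max? (x :: xs) id ≠ none := by
  simp only [PySem.List.max?]
  induction xs generalizing x with
  | nil => simp
  | cons y ys ih =>
      simp only [List.foldl_cons]
      by_cases h : x < y
      · simpa [h] using ih y
      · simpa [h] using ih x

-- ===== VERDICT (by name: the statement is the Claim_ definition above) =====
theorem solution_spec : Claim_equal_solution := by
  intro S _ hpre
  unfold Spec_solution solution solution_alt Pre_solution at *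
  simp only [PySem.Str.len_eq]
  obtain ⟨c, t, hcs⟩ : ∃ c t, S.toList = c :: t := by
    cases h : S.toList with
    | nil => rw [h] at hpre; simp at hpre
    | cons c t => exact ⟨c, t, rfl⟩
  rw [hcs] at hpre ⊢
  have ht : t ≠ [] := by
    simp only [List.length_cons] at hpre
    exact List.ne_nil_of_length_pos (by omega)
  rw [loopA_eq_rle c t ht, diffs_eq_rle c t]
  obtain ⟨x, xs, hrle⟩ : ∃ x xs, rleGo c 1 t = x :: xs := by
    cases h : rleGo c 1 t with
    | nil => exact absurd h (rleGo_ne_nil c 1 t)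
    | cons x xs => exact ⟨x, xs, rfl⟩
  obtain ⟨m, hmax⟩ : ∃ m, PySem.List.max? (rleGo c 1 t) id = some m := by
    rw [hrle]
    cases hm : PySem.List.max? (x :: xs) id with
    | none => exact absurd hm (max?_id_ne_none x xs)
    | some m => exact ⟨m, rfl⟩
  simp only [hmax]
  rw [loopA2_closed _ m (fun j hj => by simpa using PySem.List.max?_isMax hmax j hj) 0]
  rw [rleGo_sum]
  simp only [List.length_cons]
  push_cast
  ring

def solution_raises : Claim_raises_solution := by
  unfold Claim_raises_solution
  constructor
  · intro S _ hr hp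
    unfold Raises_solution at hr
    unfold Pre_solution at hp
    omega
  · exact ⟨by decide, by decide, by decide⟩
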